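-- pv_equiv track=rewrite | github.com/evga7/Algorithm-practice | 프로그래머스/lv4/49995. 쿠키 구입/쿠키 구입.py | solution
-- ===== SOURCE A (Python) =====
-- def solution(cookie):
--     answer = 0
--     for i in range(len(cookie)-1,-1,-1):
--         st = set()
--         s=0
--         for j in range(i,len(cookie)):
--             s+=cookie[j]
--             st.add(s)
--         js=0
--         for j in range(i-1,-1,-1):
--             js += cookie[j]
--             if js in st:
--                 answer=max(js,answer)
--
--     return answer
-- ===== SOURCE B (Python) =====
-- def solution(cookie):
--     n = len(cookie)
--     prefix = [0]
--     for c in cookie: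
--         prefix.append(prefix[-1] + c)
--     last = {}
--     for k, v in enumerate(prefix):
--         last[v] = k
--     answer = 0
--     for i in range(1, n):
--         pi = prefix[i]
--         for a in range(i):
--             s = pi - prefix[a]
--             if last.get(pi + s, -1) > i:
--                 if s > answer:
--                     answer = s
--     return answer
-- ===== Notes on version B (the rewrite author's own statement) =====
-- stated objective: alternative
-- what changed: Replaces the per-split set of right-side suffix sums (rebuilt from scratch for every split) by one global prefix-sum array plus a single value-to-last-index dictionary built once; each left block (a,i) is then tested with one dictionary lookup (is the last index of prefix value 2*P[i]-P[a] beyond i), removing all per-split set construction.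
import Mathlib
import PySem

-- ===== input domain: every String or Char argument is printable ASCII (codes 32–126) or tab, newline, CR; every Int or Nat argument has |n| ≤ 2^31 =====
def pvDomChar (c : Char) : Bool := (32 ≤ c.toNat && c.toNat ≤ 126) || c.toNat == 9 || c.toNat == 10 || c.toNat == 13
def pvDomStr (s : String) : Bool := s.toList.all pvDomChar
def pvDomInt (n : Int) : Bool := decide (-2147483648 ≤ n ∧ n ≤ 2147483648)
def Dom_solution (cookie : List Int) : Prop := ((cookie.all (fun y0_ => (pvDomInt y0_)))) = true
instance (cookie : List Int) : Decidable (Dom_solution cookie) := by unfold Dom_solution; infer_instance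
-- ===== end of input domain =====

-- B replaces A's per-split set of right-side suffix sums by one global prefix-sum
-- array and a value→last-index dictionary built once (objective: alternative
-- implementation of the same cost class; equal return value proved for all inputs).

-- ===== PORT A =====
-- inner loop 'for j in range(i, len(cookie)): s += cookie[j]; st.add(s)'
def pvSuffixStep (cookie : List Int) (p : PySem.Set Int × Int) (j : Int) : PySem.Set Int × Int :=
  let s := p.2 + PySem.List.pyGetD cookie j 0
  (PySem.Set.add p.1 s, s)

-- inner loop 'for j in range(i-1, -1, -1): js += cookie[j]; if js in st: answer = max(js, answer)'
def pvJsStep (st : PySem.Set Int) (cookie : List Int) (q : Int × Int) (j : Int) : Int × Int :=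
  let js := q.1 + PySem.List.pyGetD cookie j 0
  (js, if PySem.Set.contains st js then max js q.2 else q.2)

-- body of A's outer loop over i
def pvOuterA (cookie : List Int) (answer : Int) (i : Int) : Int :=
  let st := ((PySem.List.pyRange i (cookie.length : Int) 1).foldl (pvSuffixStep cookie)
      (PySem.Set.empty, 0)).1
  ((PySem.List.pyRange (i - 1) (-1) (-1)).foldl (pvJsStep st cookie) ((0 : Int), answer)).2

def solution (cookie : List Int) : Int :=
  (PySem.List.pyRange ((cookie.length : Int) - 1) (-1) (-1)).foldl (pvOuterA cookie) 0

-- ===== PORT B =====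
-- body of B's inner loop over a
def pvInnerB (pref : List Int) (last : PySem.Dict Int Int) (pi : Int) (i : Int)
    (answer : Int) (a : Int) : Int :=
  let s := pi - PySem.List.pyGetD pref a 0
  if last.getD (pi + s) (-1) > i then (if s > answer then s else answer) else answer

-- body of B's outer loop over i
def pvOuterB (pref : List Int) (last : PySem.Dict Int Int) (answer : Int) (i : Int) : Int :=
  let pi := PySem.List.pyGetD pref i 0
  (PySem.List.pyRange 0 i 1).foldl (pvInnerB pref last pi i) answer

def solution_alt (cookie : List Int) : Int :=
  let n : Int := (cookie.length : Int)
  let pref := cookie.foldl (fun acc c => acc ++ [PySem.List.pyGetD acc (-1) 0 + c]) [(0 : Int)]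
  let last := (PySem.List.enumerate pref 0).foldl
    (fun (d : PySem.Dict Int Int) kv => d.insert kv.2 kv.1) PySem.Dict.empty
  (PySem.List.pyRange 1 n 1).foldl (pvOuterB pref last) 0

-- ===== PRECONDITION & SPEC =====
def Spec_solution (cookie : List Int) (out : Int) : Prop := out = solution_alt cookie
instance (cookie : List Int) (out : Int) : Decidable (Spec_solution cookie out) := by unfold Spec_solution; infer_instance

-- ===== CLAIM (what is proved, stated in full; the proofs are below) =====
def Claim_equal_solution : Prop := ∀ (cookie : List Int), Dom_solution cookie → Spec_solution cookie (solution cookie)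

-- ===== LEMMAS AND PROOFS =====

-- prefix sum of the first k cookies
def pvP (cookie : List Int) (k : Nat) : Int := (cookie.take k).sum

-- "v is a valid common block sum at split i": a left block ending at i-1 and a right
-- block starting at i both sum to v
def pvCand (cookie : List Int) (i : Nat) (v : Int) : Prop :=
  ∃ a k : Nat, a < i ∧ i < k ∧ k ≤ cookie.length ∧
    v = pvP cookie i - pvP cookie a ∧ v = pvP cookie k - pvP cookie i

def pvQ (cookie : List Int) (v : Int) : Prop := ∃ i : Nat, pvCand cookie i v

-- the characterisation both programs satisfy
def pvIsAns (cookie : List Int) (r : Int) : Prop :=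
  0 ≤ r ∧ (r = 0 ∨ pvQ cookie r) ∧ ∀ v : Int, pvQ cookie v → v ≤ r

lemma pvIsAns_unique (cookie : List Int) (r₁ r₂ : Int)
    (h₁ : pvIsAns cookie r₁) (h₂ : pvIsAns cookie r₂) : r₁ = r₂ := by
  obtain ⟨h10, h1q, h1m⟩ := h₁
  obtain ⟨h20, h2q, h2m⟩ := h₂
  rcases h1q with h | h
  · rcases h2q with h' | h'
    · omega
    · have := h1m _ h'; omega
  · rcases h2q with h' | h'
    · have := h2m _ h; omega
    · have := h2m _ h; have := h1m _ h'; omega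

lemma pvP_succ (cookie : List Int) (k : Nat) (h : k < cookie.length) :
    pvP cookie (k + 1) = pvP cookie k + cookie.getD k 0 := by
  unfold pvP
  rw [List.take_add_one, List.sum_append]
  simp [List.getElem?_eq_getElem h, List.getD_eq_getElem?_getD]

-- generic invariant of a running-max fold
lemma pvMaxfold {α : Type} (L : List α) (pred : α → Int → Prop) (f : Int → α → Int)
    (hstep : ∀ x ∈ L, ∀ a : Int,
      a ≤ f a x ∧ (f a x = a ∨ pred x (f a x)) ∧ ∀ v, pred x v → v ≤ f a x) :
    ∀ a : Int, a ≤ L.foldl f a ∧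
      (L.foldl f a = a ∨ ∃ x ∈ L, pred x (L.foldl f a)) ∧
      ∀ x ∈ L, ∀ v, pred x v → v ≤ L.foldl f a := by
  induction L with
  | nil => intro a; simp
  | cons x L IH =>
    intro a
    have hx := hstep x (List.mem_cons_self) a
    have IH' := IH (fun y hy => hstep y (List.mem_cons_of_mem _ hy)) (f a x)
    simp only [List.foldl_cons]
    refine ⟨le_trans hx.1 IH'.1, ?_, ?_⟩
    · rcases IH'.2.1 with h | ⟨y, hy, hp⟩
      · rw [h]; rcases hx.2.1 with h' | h'
        · exact Or.inl h'
        · exact Or.inr ⟨x, List.mem_cons_self, h'⟩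
      · exact Or.inr ⟨y, List.mem_cons_of_mem _ hy, hp⟩
    · intro y hy v hv
      rcases List.mem_cons.mp hy with rfl | hy'
      · exact le_trans (hx.2.2 v hv) IH'.1
      · exact IH'.2.2 y hy' v hv

-- A's suffix-sum set: contents after the first inner loop
lemma pvSt (cookie : List Int) (i : Nat) (d : Nat) (h : i + d ≤ cookie.length) :
    ((PySem.List.pyRange (i : Int) ((i + d : Nat) : Int) 1).foldl (pvSuffixStep cookie)
      (PySem.Set.empty, 0)).2 = pvP cookie (i + d) - pvP cookie i ∧
    ∀ x : Int, x ∈ ((PySem.List.pyRange (i : Int) ((i + d : Nat) : Int) 1).foldl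
        (pvSuffixStep cookie) (PySem.Set.empty, 0)).1 ↔
      ∃ k : Nat, i < k ∧ k ≤ i + d ∧ x = pvP cookie k - pvP cookie i := by
  induction d with
  | zero =>
    rw [PySem.List.pyRange_one_eq_nil (by simp)]
    constructor
    · simp
    · intro x
      simp only [List.foldl_nil]
      constructor
      · intro hx; exact absurd hx (by simp [PySem.Set.empty])
      · rintro ⟨k, hk1, hk2, _⟩; omega
  | succ d IH =>
    have IH' := IH (by omega)
    have hsplit : PySem.List.pyRange (i : Int) ((i + (d+1) : Nat) : Int) 1 =
        PySem.List.pyRange (i : Int) ((i + d : Nat) : Int) 1 ++ [((i + d : Nat) : Int)] := by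
      have := PySem.List.pyRange_one_succ_right (a := (i : Int)) (b := ((i + d : Nat) : Int))
        (by push_cast; omega)
      rw [show ((i + (d+1) : Nat) : Int) = ((i + d : Nat) : Int) + 1 by push_cast; ring]
      exact this
    rw [hsplit, List.foldl_append, List.foldl_cons, List.foldl_nil]
    set p := (PySem.List.pyRange (i : Int) ((i + d : Nat) : Int) 1).foldl
      (pvSuffixStep cookie) (PySem.Set.empty, 0) with hp
    have hget : PySem.List.pyGetD cookie ((i + d : Nat) : Int) 0 = cookie.getD (i + d) 0 := by
      rw [PySem.List.pyGetD_natCast]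
    have hs : (pvSuffixStep cookie p ((i + d : Nat) : Int)).2 = pvP cookie (i + (d+1)) - pvP cookie i := by
      simp only [pvSuffixStep, hget, IH'.1]
      rw [show i + (d+1) = (i + d) + 1 by ring, pvP_succ cookie (i+d) (by omega)]
      ring
    refine ⟨hs, ?_⟩
    intro x
    simp only [pvSuffixStep, PySem.Set.mem_add, hget, IH'.1]
    rw [IH'.2 x]
    constructor
    · rintro (⟨k, hk1, hk2, hk3⟩ | hx)
      · exact ⟨k, hk1, by omega, hk3⟩
      · refine ⟨i + d + 1, by omega, by omega, ?_⟩
        rw [hx, pvP_succ cookie (i+d) (by omega)]; ring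
    · rintro ⟨k, hk1, hk2, hk3⟩
      by_cases hk : k ≤ i + d
      · exact Or.inl ⟨k, hk1, hk, hk3⟩
      · have : k = i + d + 1 := by omega
        subst this
        right
        rw [hk3, pvP_succ cookie (i+d) (by omega)]; ring

lemma pvJsStep_eq (st : PySem.Set Int) (cookie : List Int) (q : Int × Int) (j : Int) :
    pvJsStep st cookie q j =
      (q.1 + PySem.List.pyGetD cookie j 0,
       if (q.1 + PySem.List.pyGetD cookie j 0) ∈ st then
         max (q.1 + PySem.List.pyGetD cookie j 0) q.2 else q.2) := by
  simp only [pvJsStep]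
  by_cases hmem : (q.1 + PySem.List.pyGetD cookie j 0) ∈ st
  · rw [if_pos hmem, if_pos ((PySem.Set.contains_iff _ _).mpr hmem)]
  · rw [if_neg hmem, if_neg (fun hc => hmem ((PySem.Set.contains_iff _ _).mp hc))]

-- A's second inner loop: running max over left block sums that are members of st
lemma pvJs (cookie : List Int) (st : PySem.Set Int) (i : Nat) :
    ∀ (t : Nat), t < cookie.length → ∀ (ans : Int),
      ans ≤ ((PySem.List.pyRange (t : Int) (-1) (-1)).foldl (pvJsStep st cookie)
          (pvP cookie i - pvP cookie (t + 1), ans)).2 ∧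
      (((PySem.List.pyRange (t : Int) (-1) (-1)).foldl (pvJsStep st cookie)
          (pvP cookie i - pvP cookie (t + 1), ans)).2 = ans ∨
        ∃ a : Nat, a ≤ t ∧
          ((PySem.List.pyRange (t : Int) (-1) (-1)).foldl (pvJsStep st cookie)
            (pvP cookie i - pvP cookie (t + 1), ans)).2 = pvP cookie i - pvP cookie a ∧
          (pvP cookie i - pvP cookie a) ∈ st) ∧
      ∀ a : Nat, a ≤ t → (pvP cookie i - pvP cookie a) ∈ st →
        pvP cookie i - pvP cookie a ≤
          ((PySem.List.pyRange (t : Int) (-1) (-1)).foldl (pvJsStep st cookie)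
            (pvP cookie i - pvP cookie (t + 1), ans)).2 := by
  intro t
  induction t with
  | zero =>
    intro ht ans
    rw [show ((0:Nat) : Int) = (0:Int) by norm_num,
      PySem.List.pyRange_neg_one_cons (by norm_num),
      show (0:Int) - 1 = -1 by norm_num, PySem.List.pyRange_neg_one_eq_nil le_rfl,
      List.foldl_cons, List.foldl_nil, pvJsStep_eq]
    have hjs : pvP cookie i - pvP cookie (0 + 1) + PySem.List.pyGetD cookie 0 0 =
        pvP cookie i - pvP cookie 0 := by
      rw [PySem.List.pyGetD_zero, pvP_succ cookie 0 ht]; ring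
    simp only [hjs]
    by_cases hmem : (pvP cookie i - pvP cookie 0) ∈ st
    · rw [if_pos hmem]
      refine ⟨le_max_right _ _, ?_, ?_⟩
      · rcases max_choice (pvP cookie i - pvP cookie 0) ans with h | h
        · exact Or.inr ⟨0, le_rfl, h, hmem⟩
        · exact Or.inl h
      · intro a ha _
        have : a = 0 := by omega
        subst this
        exact le_max_left _ _
    · rw [if_neg hmem]
      refine ⟨le_rfl, Or.inl rfl, ?_⟩
      intro a ha hm
      have : a = 0 := by omega
      subst this
      exact absurd hm hmem
  | succ t IH =>
    intro ht ans
    have hcons : PySem.List.pyRange ((t+1 : Nat) : Int) (-1) (-1) =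
        ((t+1 : Nat) : Int) :: PySem.List.pyRange (t : Int) (-1) (-1) := by
      rw [PySem.List.pyRange_neg_one_cons (by push_cast; omega),
        show ((t+1 : Nat) : Int) - 1 = (t : Int) by push_cast; ring]
    rw [hcons, List.foldl_cons, pvJsStep_eq]
    have hjs : pvP cookie i - pvP cookie (t + 1 + 1) + PySem.List.pyGetD cookie ((t+1 : Nat) : Int) 0 =
        pvP cookie i - pvP cookie (t + 1) := by
      rw [PySem.List.pyGetD_natCast, pvP_succ cookie (t+1) ht]; ring
    simp only [hjs]
    set ans' := if (pvP cookie i - pvP cookie (t+1)) ∈ st then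
        max (pvP cookie i - pvP cookie (t+1)) ans else ans with hans'
    have hIH := IH (by omega) ans'
    have hle : ans ≤ ans' := by
      rw [hans']; split_ifs
      · exact le_max_right _ _
      · exact le_rfl
    refine ⟨le_trans hle hIH.1, ?_, ?_⟩
    · rcases hIH.2.1 with h | ⟨a, ha, h1, h2⟩
      · rw [h, hans']
        by_cases hmem : (pvP cookie i - pvP cookie (t+1)) ∈ st
        · rw [if_pos hmem]
          rcases max_choice (pvP cookie i - pvP cookie (t+1)) ans with h' | h'
          · exact Or.inr ⟨t+1, le_rfl, h', hmem⟩
          · exact Or.inl h'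
        · rw [if_neg hmem]; exact Or.inl rfl
      · exact Or.inr ⟨a, by omega, h1, h2⟩
    · intro a ha hm
      by_cases hat : a ≤ t
      · exact hIH.2.2 a hat hm
      · have : a = t + 1 := by omega
        subst this
        have h1 : pvP cookie i - pvP cookie (t+1) ≤ ans' := by
          rw [hans', if_pos hm]; exact le_max_left _ _
        exact le_trans h1 hIH.1

-- A's outer body satisfies the max-step contract for pvCand
lemma pvStepA (cookie : List Int) (i : Nat) (hi : i < cookie.length) (a : Int) :
    a ≤ pvOuterA cookie a (i : Int) ∧
    (pvOuterA cookie a (i : Int) = a ∨ pvCand cookie i (pvOuterA cookie a (i : Int))) ∧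
    ∀ v, pvCand cookie i v → v ≤ pvOuterA cookie a (i : Int) := by
  have hst := pvSt cookie i (cookie.length - i) (by omega)
  rw [show i + (cookie.length - i) = cookie.length by omega] at hst
  simp only [pvOuterA]
  set st := ((PySem.List.pyRange (i : Int) (cookie.length : Int) 1).foldl
      (pvSuffixStep cookie) (PySem.Set.empty, 0)).1 with hstdef
  rcases Nat.eq_zero_or_pos i with rfl | hpos
  · rw [show ((0 : Nat) : Int) - 1 = -1 by norm_num,
      PySem.List.pyRange_neg_one_eq_nil le_rfl, List.foldl_nil]
    refine ⟨le_rfl, Or.inl rfl, ?_⟩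
    rintro v ⟨a', k, h1, _⟩
    omega
  · have hcast : ((i : Nat) : Int) - 1 = ((i - 1 : Nat) : Int) := by omega
    have hJ := pvJs cookie st i (i - 1) (by omega) a
    rw [show i - 1 + 1 = i by omega, sub_self] at hJ
    rw [hcast]
    have hmem : ∀ v : Int, ((∃ a' : Nat, a' ≤ i - 1 ∧ v = pvP cookie i - pvP cookie a' ∧
        (pvP cookie i - pvP cookie a') ∈ st) ↔ pvCand cookie i v) := by
      intro v
      constructor
      · rintro ⟨a', ha', hv, hm⟩
        obtain ⟨k, hk1, hk2, hk3⟩ := (hst.2 _).mp hm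
        exact ⟨a', k, by omega, hk1, hk2, hv, by rw [hv, hk3]⟩
      · rintro ⟨a', k, h1, h2, h3, h4, h5⟩
        refine ⟨a', by omega, h4, ?_⟩
        exact (hst.2 _).mpr ⟨k, h2, h3, by rw [← h4, h5]⟩
    refine ⟨hJ.1, ?_, ?_⟩
    · rcases hJ.2.1 with h | ⟨a', ha', h1, h2⟩
      · exact Or.inl h
      · exact Or.inr (by rw [h1]; exact (hmem _).mp ⟨a', ha', rfl, h2⟩)
    · intro v hv
      obtain ⟨a', ha', hveq, hm⟩ := (hmem v).mpr hv
      rw [hveq]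
      exact hJ.2.2 a' ha' hm

lemma pvA_isAns (cookie : List Int) : pvIsAns cookie (solution cookie) := by
  unfold solution
  have hM := pvMaxfold (PySem.List.pyRange ((cookie.length : Int) - 1) (-1) (-1))
    (fun i v => ∃ iN : Nat, i = (iN : Int) ∧ pvCand cookie iN v)
    (pvOuterA cookie) ?_ 0
  · refine ⟨hM.1, ?_, ?_⟩
    · rcases hM.2.1 with h | ⟨x, hx, iN, hix, hc⟩
      · exact Or.inl h
      · exact Or.inr ⟨iN, hc⟩
    · rintro v ⟨iN, hc⟩
      have hiNlt : iN < cookie.length := by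
        obtain ⟨a', k, _, h2, h3, _⟩ := hc
        omega
      refine hM.2.2 (iN : Int) ?_ v ⟨iN, rfl, hc⟩
      rw [PySem.List.mem_pyRange_neg_one]
      constructor
      · omega
      · omega
  · intro x hx a
    rw [PySem.List.mem_pyRange_neg_one] at hx
    obtain ⟨iN, rfl⟩ : ∃ iN : Nat, x = (iN : Int) := ⟨x.toNat, by omega⟩
    have hiN : iN < cookie.length := by omega
    have h := pvStepA cookie iN hiN a
    refine ⟨h.1, ?_, ?_⟩
    · rcases h.2.1 with h' | h'
      · exact Or.inl h'
      · exact Or.inr ⟨iN, rfl, h'⟩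
    · rintro v ⟨iN', hix, hc⟩
      have : iN' = iN := by omega
      subst this
      exact h.2.2 v hc

-- B's prefix list is a scanl
lemma pvBuild (l : List Int) : ∀ (acc : List Int) (x : Int),
    l.foldl (fun acc c => acc ++ [PySem.List.pyGetD acc (-1) 0 + c]) (acc ++ [x]) =
      acc ++ List.scanl (· + ·) x l := by
  induction l with
  | nil => intro acc x; simp
  | cons c l IH =>
    intro acc x
    simp only [List.foldl_cons, List.scanl_cons]
    rw [PySem.List.pyGetD_neg_one_append_singleton]
    have := IH (acc ++ [x]) (x + c)
    simpa using this

lemma pvScanl_getD (l : List Int) : ∀ (s : Int) (k : Nat), k ≤ l.length →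
    (List.scanl (· + ·) s l).getD k 0 = s + (l.take k).sum := by
  induction l with
  | nil => intro s k hk; simp at hk; subst hk; simp
  | cons c l IH =>
    intro s k hk
    cases k with
    | zero => simp
    | succ k =>
      simp only [List.scanl_cons, List.getD_cons_succ, List.take_succ_cons, List.sum_cons]
      rw [IH (s + c) k (by simpa using hk)]
      ring

def pvPrefOf (cookie : List Int) : List Int :=
  cookie.foldl (fun acc c => acc ++ [PySem.List.pyGetD acc (-1) 0 + c]) [(0 : Int)]

def pvLastOf (cookie : List Int) : PySem.Dict Int Int :=
  (PySem.List.enumerate (pvPrefOf cookie) 0).foldl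
    (fun (d : PySem.Dict Int Int) kv => d.insert kv.2 kv.1) PySem.Dict.empty

lemma pvPrefOf_eq (cookie : List Int) : pvPrefOf cookie = List.scanl (· + ·) 0 cookie := by
  have := pvBuild cookie [] 0
  simpa [pvPrefOf] using this

lemma pvPrefOf_getD (cookie : List Int) (k : Nat) (h : k ≤ cookie.length) :
    (pvPrefOf cookie).getD k 0 = pvP cookie k := by
  rw [pvPrefOf_eq, pvScanl_getD cookie 0 k h]; simp [pvP]

lemma pvPrefOf_length (cookie : List Int) : (pvPrefOf cookie).length = cookie.length + 1 := by
  rw [pvPrefOf_eq]; simp [List.length_scanl]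

-- the last-index dictionary: getD … (-1) > i iff some later position has that prefix value
lemma pvLastD (ps : List (Int × Int)) (hp : ps.Pairwise (fun u v => u.1 ≤ v.1))
    (v : Int) (i : Int) (hi : 0 ≤ i) :
    (PySem.Dict.getD (ps.foldl (fun (d : PySem.Dict Int Int) kv => d.insert kv.2 kv.1)
        PySem.Dict.empty) v (-1) > i) ↔ ∃ kv ∈ ps, kv.2 = v ∧ kv.1 > i := by
  induction ps using List.reverseRecOn with
  | nil => simp [PySem.Dict.getD_empty]; omega
  | append_singleton ps p IH =>
    rw [List.pairwise_append] at hp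
    rw [List.foldl_append, List.foldl_cons, List.foldl_nil, PySem.Dict.getD_insert]
    by_cases hv : v = p.2
    · rw [if_pos hv]
      constructor
      · intro h; exact ⟨p, by simp, hv.symm, h⟩
      · rintro ⟨kv, hkv, hkv2, hkv1⟩
        rcases List.mem_append.mp hkv with h | h
        · have := hp.2.2 kv h p (by simp); omega
        · simp at h; subst h; exact hkv1
    · rw [if_neg hv, IH hp.1]
      constructor
      · rintro ⟨kv, hkv, h2, h1⟩; exact ⟨kv, List.mem_append_left _ hkv, h2, h1⟩
      · rintro ⟨kv, hkv, h2, h1⟩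
        rcases List.mem_append.mp hkv with h | h
        · exact ⟨kv, h, h2, h1⟩
        · simp at h; subst h; exact absurd h2.symm hv

lemma pvLastOf_gt (cookie : List Int) (v : Int) (i : Int) (hi : 0 ≤ i) :
    ((pvLastOf cookie).getD v (-1) > i) ↔
      ∃ k : Nat, k ≤ cookie.length ∧ pvP cookie k = v ∧ (k : Int) > i := by
  have henum : PySem.List.enumerate (pvPrefOf cookie) 0 =
      (PySem.List.pyRange 0 ((pvPrefOf cookie).length : Int) 1).map
        (fun j => (j, PySem.List.pyGetD (pvPrefOf cookie) j 0)) := by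
    simpa using PySem.List.enumerate_eq_map_pyRange (xs := pvPrefOf cookie) (d := 0)
  have hpair : (PySem.List.enumerate (pvPrefOf cookie) 0).Pairwise (fun u v => u.1 ≤ v.1) := by
    rw [henum, List.pairwise_map]
    exact (PySem.List.pairwise_lt_pyRange_one 0 ((pvPrefOf cookie).length : Int) ).imp
      (fun h => le_of_lt h)
  rw [pvLastOf, pvLastD _ hpair v i hi]
  constructor
  · rintro ⟨kv, hkv, h2, h1⟩
    rw [henum] at hkv
    obtain ⟨j, hj, rfl⟩ := List.mem_map.mp hkv
    rw [PySem.List.mem_pyRange_one] at hj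
    refine ⟨j.toNat, ?_, ?_, ?_⟩
    · have := pvPrefOf_length cookie; omega
    · rw [← h2]; simp only
      rw [show j = (j.toNat : Int) by omega, PySem.List.pyGetD_natCast,
        pvPrefOf_getD cookie j.toNat (by have := pvPrefOf_length cookie; omega)]
      congr 1
    · simp only at h1; omega
  · rintro ⟨k, hk, hv, hki⟩
    refine ⟨((k : Int), v), ?_, rfl, hki⟩
    rw [henum]
    refine List.mem_map.mpr ⟨(k : Int), ?_, ?_⟩
    · rw [PySem.List.mem_pyRange_one]
      constructor
      · omega
      · rw [pvPrefOf_length]; push_cast; omega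
    · rw [PySem.List.pyGetD_natCast, pvPrefOf_getD cookie k hk, hv]

-- B's outer body satisfies the max-step contract for pvCand
lemma pvStepB (cookie : List Int) (i : Nat) (hi : i < cookie.length) (a : Int) :
    a ≤ pvOuterB (pvPrefOf cookie) (pvLastOf cookie) a (i : Int) ∧
    (pvOuterB (pvPrefOf cookie) (pvLastOf cookie) a (i : Int) = a ∨
      pvCand cookie i (pvOuterB (pvPrefOf cookie) (pvLastOf cookie) a (i : Int))) ∧
    ∀ v, pvCand cookie i v → v ≤ pvOuterB (pvPrefOf cookie) (pvLastOf cookie) a (i : Int) := by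
  have hpi : PySem.List.pyGetD (pvPrefOf cookie) (i : Int) 0 = pvP cookie i := by
    rw [PySem.List.pyGetD_natCast]
    exact pvPrefOf_getD cookie i (by omega)
  simp only [pvOuterB, hpi]
  have hM := pvMaxfold (PySem.List.pyRange 0 (i : Int) 1)
    (fun a' v => ∃ aN : Nat, a' = (aN : Int) ∧ aN < i ∧ v = pvP cookie i - pvP cookie aN ∧
      ∃ k : Nat, i < k ∧ k ≤ cookie.length ∧ v = pvP cookie k - pvP cookie i)
    (pvInnerB (pvPrefOf cookie) (pvLastOf cookie) (pvP cookie i) (i : Int)) ?_ a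
  · have hiff : ∀ v : Int, pvCand cookie i v ↔
        ∃ a' ∈ PySem.List.pyRange 0 (i : Int) 1, ∃ aN : Nat, a' = (aN : Int) ∧ aN < i ∧
          v = pvP cookie i - pvP cookie aN ∧
          ∃ k : Nat, i < k ∧ k ≤ cookie.length ∧ v = pvP cookie k - pvP cookie i := by
      intro v
      constructor
      · rintro ⟨aN, k, h1, h2, h3, h4, h5⟩
        refine ⟨(aN : Int), ?_, aN, rfl, h1, h4, k, h2, h3, h5⟩
        rw [PySem.List.mem_pyRange_one]
        omega
      · rintro ⟨a', ha', aN, rfl, h1, h2, k, h3, h4, h5⟩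
        exact ⟨aN, k, h1, h3, h4, h2, h5⟩
    refine ⟨hM.1, ?_, ?_⟩
    · rcases hM.2.1 with h | ⟨a', ha', hp⟩
      · exact Or.inl h
      · exact Or.inr ((hiff _).mpr ⟨a', ha', hp⟩)
    · intro v hv
      obtain ⟨a', ha', hp⟩ := (hiff v).mp hv
      exact hM.2.2 a' ha' v hp
  · intro a' ha' ans
    rw [PySem.List.mem_pyRange_one] at ha'
    obtain ⟨aN, rfl⟩ : ∃ aN : Nat, a' = (aN : Int) := ⟨a'.toNat, by omega⟩
    have haN : aN < i := by omega
    have hga : PySem.List.pyGetD (pvPrefOf cookie) ((aN : Nat) : Int) 0 = pvP cookie aN := by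
      rw [PySem.List.pyGetD_natCast]
      exact pvPrefOf_getD cookie aN (by omega)
    simp only [pvInnerB, hga]
    set s := pvP cookie i - pvP cookie aN with hs
    have hcond := pvLastOf_gt cookie (pvP cookie i + s) (i : Int) (by omega)
    by_cases hc : ((pvLastOf cookie).getD (pvP cookie i + s) (-1) > (i : Int))
    · rw [if_pos hc]
      obtain ⟨k, hk1, hk2, hk3⟩ := hcond.mp hc
      have hkgt : i < k := by omega
      have hsk : s = pvP cookie k - pvP cookie i := by omega
      refine ⟨?_, ?_, ?_⟩
      · split_ifs with h
        · omega
        · exact le_rfl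
      · split_ifs with h
        · exact Or.inr ⟨aN, rfl, haN, hs, k, hkgt, hk1, hsk⟩
        · exact Or.inl rfl
      · rintro v ⟨aN', haN'', hlt, hveq, k', hk1', hk2', hk3'⟩
        have : aN' = aN := by omega
        subst this
        rw [hveq, ← hs]
        split_ifs with h
        · exact le_rfl
        · omega
    · rw [if_neg hc]
      refine ⟨le_rfl, Or.inl rfl, ?_⟩
      rintro v ⟨aN', haN'', hlt, hveq, k', hk1', hk2', hk3'⟩
      have : aN' = aN := by omega
      subst this
      exfalso
      apply hc
      apply hcond.mpr
      refine ⟨k', hk2', ?_, by exact_mod_cast hk1'⟩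
      rw [hveq] at hk3'
      omega

lemma pvB_isAns (cookie : List Int) : pvIsAns cookie (solution_alt cookie) := by
  have hrw : solution_alt cookie = (PySem.List.pyRange 1 (cookie.length : Int) 1).foldl
      (pvOuterB (pvPrefOf cookie) (pvLastOf cookie)) 0 := rfl
  rw [hrw]
  have hM := pvMaxfold (PySem.List.pyRange 1 (cookie.length : Int) 1)
    (fun i v => ∃ iN : Nat, i = (iN : Int) ∧ pvCand cookie iN v)
    (pvOuterB (pvPrefOf cookie) (pvLastOf cookie)) ?_ 0
  · refine ⟨hM.1, ?_, ?_⟩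
    · rcases hM.2.1 with h | ⟨x, hx, iN, hix, hc⟩
      · exact Or.inl h
      · exact Or.inr ⟨iN, hc⟩
    · rintro v ⟨iN, hc⟩
      have hb : 1 ≤ iN ∧ iN < cookie.length := by
        obtain ⟨a', k, h1, h2, h3, _⟩ := hc
        omega
      refine hM.2.2 (iN : Int) ?_ v ⟨iN, rfl, hc⟩
      rw [PySem.List.mem_pyRange_one]
      omega
  · intro x hx a
    rw [PySem.List.mem_pyRange_one] at hx
    obtain ⟨iN, rfl⟩ : ∃ iN : Nat, x = (iN : Int) := ⟨x.toNat, by omega⟩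
    have h := pvStepB cookie iN (by omega) a
    refine ⟨h.1, ?_, ?_⟩
    · rcases h.2.1 with h' | h'
      · exact Or.inl h'
      · exact Or.inr ⟨iN, rfl, h'⟩
    · rintro v ⟨iN', hix, hc⟩
      have : iN' = iN := by omega
      subst this
      exact h.2.2 v hc

-- ===== VERDICT (by name: the statement is the Claim_ definition above) =====
theorem solution_spec : Claim_equal_solution := by
  intro cookie _
  unfold Spec_solution
  exact pvIsAns_unique cookie _ _ (pvA_isAns cookie) (pvB_isAns cookie)
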